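-- pv_equiv track=rewrite | github.com/rodrigo-castellon/euler-problems | Euler19/Euler19.py | determine_year_num
-- ===== SOURCE A (Python) =====
-- def determine_year_num(index):
-- 	i = 1900
-- 	while i < 2001 and index > 0:
-- 		if i % 4 == 0 and not i % 400 == 0:
-- 			index -= 366
-- 		else:
-- 			index -= 365
-- 		i += 1
-- 	return i
-- ===== SOURCE B (Python) =====
-- def _build_cumsum():
--     c = [0]
--     t = 0
--     for y in range(1900, 2001):
--         t += 366 if y % 4 == 0 and y % 400 != 0 else 365
--         c.append(t)
--     return c
--
-- _CUM = _build_cumsum()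
--
-- def determine_year_num(index):
--     # binary search: smallest k in [0, 101] with k == 101 or _CUM[k] >= index
--     lo, hi = 0, 101
--     while lo < hi:
--         mid = (lo + hi) // 2
--         if _CUM[mid] < index:
--             lo = mid + 1
--         else:
--             hi = mid
--     return 1900 + lo
-- ===== Notes on version B (the rewrite author's own statement) =====
-- stated objective: alternative
-- what changed: Replaced the year-by-year decrement loop with a precomputed cumulative-days table built once at module load plus a binary search over it inside the function.
import Mathlib
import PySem

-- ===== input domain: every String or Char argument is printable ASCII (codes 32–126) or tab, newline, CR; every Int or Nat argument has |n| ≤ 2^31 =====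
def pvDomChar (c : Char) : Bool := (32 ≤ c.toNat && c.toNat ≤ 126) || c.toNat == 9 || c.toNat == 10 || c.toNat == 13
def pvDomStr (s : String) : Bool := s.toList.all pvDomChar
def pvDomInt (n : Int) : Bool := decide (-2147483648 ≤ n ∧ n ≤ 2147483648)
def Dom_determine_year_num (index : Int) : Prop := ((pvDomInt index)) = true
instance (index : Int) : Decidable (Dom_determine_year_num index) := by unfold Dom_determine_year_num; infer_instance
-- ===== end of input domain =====

-- B replaces A's linear year-by-year decrement loop by a precomputed cumulative-days
-- table plus a binary search over it (a different algorithm; exact same values).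

-- ===== PORT A =====
-- the while loop 'while i < 2001 and index > 0' runs at most 101 times (i goes 1900..2000);
-- fuel 101 starting at i = 1900 is exactly that bound, so this is a literal transcription.
def pvLoopA : Nat → Int → Int → Int
  | 0, i, _ => i
  | fuel + 1, i, index =>
    if index > 0 then
      pvLoopA fuel (i + 1) (index - (if i % 4 == 0 && !(i % 400 == 0) then 366 else 365))
    else i

def determine_year_num (index : Int) : Int := pvLoopA 101 1900 index

-- ===== PORT B =====
-- module-level table _CUM (Source B): cumulative day counts for years 1900..2000, c[0] = 0
def pvCum : List Int :=
  ((PySem.List.pyRange 1900 2001 1).foldl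
    (fun (st : List Int × Int) y =>
      let t := st.2 + (if y % 4 == 0 && !(y % 400 == 0) then 366 else 365)
      (st.1 ++ [t], t))
    ([0], 0)).1

-- binary search of Source B: _CUM[mid] is always in range (mid < hi ≤ 101 < 102 = length), so getD is exact
def pvBsearch (c : List Int) (index : Int) (lo hi : Nat) : Nat :=
  if _h : lo < hi then
    let mid := (lo + hi) / 2
    if c.getD mid 0 < index then pvBsearch c index (mid + 1) hi
    else pvBsearch c index lo mid
  else lo
termination_by hi - lo
decreasing_by all_goals omega

def determine_year_num_alt (index : Int) : Int := 1900 + (pvBsearch pvCum index 0 101 : Int)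

-- ===== PRECONDITION & SPEC =====
def Spec_determine_year_num (index : Int) (out : Int) : Prop := out = determine_year_num_alt index
instance (index : Int) (out : Int) : Decidable (Spec_determine_year_num index out) := by unfold Spec_determine_year_num; infer_instance

-- ===== CLAIM (what is proved, stated in full; the proofs are below) =====
def Claim_equal_determine_year_num : Prop := ∀ (index : Int), Dom_determine_year_num index → Spec_determine_year_num index (determine_year_num index)

-- ===== LEMMAS AND PROOFS =====

-- recursive cumulative sum: Scum k = days in years 1900..1900+k-1 under A's leap rule
def Scum : Nat → Int
  | 0 => 0
  | k + 1 => Scum k + (if ((1900 + (k : Int)) % 4 == 0) && !((1900 + (k : Int)) % 400 == 0) then 366 else 365)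

set_option maxRecDepth 4000 in
theorem pvCum_eq : pvCum = (List.range 102).map Scum := by decide

theorem Scum_lt_succ (k : Nat) : Scum k < Scum (k + 1) := by
  show Scum k < Scum k + _
  split <;> omega

theorem Scum_mono {j k : Nat} (h : j ≤ k) : Scum j ≤ Scum k := by
  induction k with
  | zero =>
    have : j = 0 := Nat.le_zero.mp h
    simp [this]
  | succ n ih =>
    rcases Nat.lt_or_ge j (n + 1) with h' | h'
    · exact le_trans (ih (by omega)) (le_of_lt (Scum_lt_succ n))
    · have : j = n + 1 := by omega
      simp [this]

theorem pvCum_getD (k : Nat) (hk : k < 102) : pvCum.getD k 0 = Scum k := by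
  rw [pvCum_eq]
  rw [List.getD_eq_getElem?_getD, List.getElem?_map, List.getElem?_range hk]
  rfl

-- the binary search returns a k with: lo0 ≤ k ≤ hi0, everything before k is < index,
-- and (if k < 101) Scum k ≥ index
theorem pvBsearch_char (index : Int) :
    ∀ n lo hi, hi - lo = n → lo ≤ hi → hi ≤ 101 →
    (∀ j, j < lo → Scum j < index) →
    (∀ j, hi ≤ j → j ≤ 100 → ¬ Scum j < index) →
    (lo ≤ pvBsearch pvCum index lo hi ∧ pvBsearch pvCum index lo hi ≤ hi ∧
      (∀ j, j < pvBsearch pvCum index lo hi → Scum j < index) ∧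
      (pvBsearch pvCum index lo hi ≤ 100 → ¬ Scum (pvBsearch pvCum index lo hi) < index)) := by
  intro n
  induction n using Nat.strong_induction_on with
  | _ n ih =>
    intro lo hi hn hle hhi hbefore hafter
    rw [pvBsearch]
    by_cases h : lo < hi
    · simp only [h, dif_pos]
      have hmid : (lo + hi) / 2 < 102 := by omega
      rw [pvCum_getD _ hmid]
      by_cases hc : Scum ((lo + hi) / 2) < index
      · simp only [hc, if_pos]
        have := ih (hi - ((lo + hi) / 2 + 1)) (by omega) ((lo + hi) / 2 + 1) hi rfl
          (by omega) hhi
          (fun j hj => by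
            rcases Nat.lt_or_ge j lo with h' | h'
            · exact hbefore j h'
            · exact lt_of_le_of_lt (Scum_mono (by omega)) hc)
          hafter
        exact ⟨by omega, this.2.1, this.2.2.1, this.2.2.2⟩
      · simp only [hc, if_false]
        have := ih (((lo + hi) / 2) - lo) (by omega) lo ((lo + hi) / 2) rfl
          (by omega) (by omega) hbefore
          (fun j hj _ hlt => hc (lt_of_le_of_lt (Scum_mono hj) hlt))
        exact ⟨this.1, by omega, this.2.2.1, this.2.2.2⟩
    · simp only [h, dif_neg, not_false_iff]
      have : lo = hi := by omega
      exact ⟨le_refl _, le_of_eq this, hbefore, fun h100 => hafter lo (by omega) h100⟩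

-- A's loop, started at year 1900+k with remaining index - Scum k, lands exactly at
-- any r satisfying the binary-search characterization
theorem pvLoopA_char (index : Int) (r : Nat) (hr101 : r ≤ 101)
    (hlt : ∀ j, j < r → Scum j < index)
    (hge : r ≤ 100 → ¬ Scum r < index) :
    ∀ n k, k + n = 101 → k ≤ r →
    pvLoopA n (1900 + (k : Int)) (index - Scum k) = 1900 + (r : Int) := by
  intro n
  induction n with
  | zero =>
    intro k hk hkr
    have : k = 101 := by omega
    have : r = 101 := by omega
    simp_all [pvLoopA]
  | succ m ihm =>
    intro k hk hkr
    rw [pvLoopA]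
    by_cases hc : index - Scum k > 0
    · simp only [hc, if_pos]
      have hkr' : k + 1 ≤ r := by
        rcases Nat.lt_or_ge k r with h' | h'
        · omega
        · have : k = r := by omega
          subst this
          exact absurd (by omega : Scum k < index) (hge (by omega))
      have harg : index - Scum k - (if ((1900 + (k : Int)) % 4 == 0) && !((1900 + (k : Int)) % 400 == 0) then 366 else 365) = index - Scum (k + 1) := by
        show _ = index - (Scum k + _)
        ring
      have hstep : (1900 + (k : Int)) + 1 = 1900 + ((k + 1 : Nat) : Int) := by push_cast; ring
      rw [harg, hstep]
      exact ihm (k + 1) (by omega) hkr'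
    · simp only [hc, if_false]
      have : r = k := by
        rcases Nat.lt_or_ge k r with h' | h'
        · exact absurd (hlt k h') (by omega)
        · omega
      simp [this]

-- ===== VERDICT (by name: the statement is the Claim_ definition above) =====
theorem determine_year_num_spec : Claim_equal_determine_year_num := by
  intro index _
  unfold Spec_determine_year_num determine_year_num determine_year_num_alt
  set r := pvBsearch pvCum index 0 101 with hrdef
  have hchar := pvBsearch_char index 101 0 101 rfl (by omega) (le_refl _)
    (fun j hj => absurd hj (Nat.not_lt_zero j))
    (fun j hj hj' => absurd (le_trans hj hj') (by omega))
  rw [← hrdef] at hchar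
  have := pvLoopA_char index r hchar.2.1 hchar.2.2.1 hchar.2.2.2 101 0 rfl (Nat.zero_le r)
  simpa [Scum] using this
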